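-- pv_equiv track=rewrite | github.com/hapax-systems/hapax-council | shared/visual_variance_ledger.py | _graph_family
-- ===== SOURCE A (Python) =====
-- from collections.abc import Mapping, Sequence
--
-- _UNKNOWN_MARKERS = frozenset({"", "unknown", "none", "null", "missing"})
--
-- def _unknownish(value: object) -> bool:
--     return str(value).strip().lower() in _UNKNOWN_MARKERS
--
-- def _graph_family(families: Sequence[str]) -> str:
--     counts: dict[str, int] = {}
--     for family in families:
--         if _unknownish(family):
--             continue
--         counts[family] = counts.get(family, 0) + 1
--     if not counts:
--         return "unknown"
--     return "+".join(f"{family}:{counts[family]}" for family in sorted(counts))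
-- ===== SOURCE B (Python) =====
-- from itertools import groupby
--
-- _UNKNOWN_MARKERS = frozenset({"", "unknown", "none", "null", "missing"})
--
--
-- def _unknownish(value: object) -> bool:
--     return str(value).strip().lower() in _UNKNOWN_MARKERS
--
--
-- def _graph_family(families):
--     kept = sorted(f for f in families if not _unknownish(f))
--     if not kept:
--         return "unknown"
--     return "+".join(f"{key}:{sum(1 for _ in group)}" for key, group in groupby(kept))
-- ===== Notes on version B (the rewrite author's own statement) =====
-- stated objective: idiomatic
-- what changed: Replaces the dict-count-then-sort-keys strategy by filtering, sorting the whole kept list once, and counting each consecutive run with itertools.groupby.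
import Mathlib
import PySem

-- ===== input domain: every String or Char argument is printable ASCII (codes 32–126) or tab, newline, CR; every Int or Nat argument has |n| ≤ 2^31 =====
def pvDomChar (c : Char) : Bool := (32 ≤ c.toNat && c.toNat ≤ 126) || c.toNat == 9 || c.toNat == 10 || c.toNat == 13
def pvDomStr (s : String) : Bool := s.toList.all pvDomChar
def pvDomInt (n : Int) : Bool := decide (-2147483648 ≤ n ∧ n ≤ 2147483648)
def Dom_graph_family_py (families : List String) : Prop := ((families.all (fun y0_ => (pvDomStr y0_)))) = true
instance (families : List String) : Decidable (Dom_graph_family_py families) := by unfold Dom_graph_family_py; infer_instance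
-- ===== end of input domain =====

-- B builds the same "family:count" summary by filter-sort-then-group-adjacent-runs (itertools.groupby) instead of dict counting; objective: idiomatic.

-- ===== PORT A =====
-- _unknownish: str(value).strip().lower() in _UNKNOWN_MARKERS
def pvUnknownish (s : String) : Bool :=
  ["", "unknown", "none", "null", "missing"].contains (PySem.Str.lower (PySem.Str.strip s))

def graph_family_py (families : List String) : String :=
  let counts : PySem.Dict String Int :=
    families.foldl (fun d family =>
      if pvUnknownish family then d
      else d.insert family (d.getD family 0 + 1)) PySem.Dict.empty
  if counts.size = 0 then "unknown"
  else PySem.Str.join "+"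
    ((PySem.List.sorted counts.keys (fun x => x) false).map
      (fun family => family ++ ":" ++ PySem.Int.toStr (counts.getD family 0)))

-- ===== PORT B =====
-- itertools.groupby over the sorted kept list: consecutive runs as (key, run length)
def pvGroupAux (k : String) (n : Int) : List String → List (String × Int)
  | [] => [(k, n)]
  | y :: ys => if y == k then pvGroupAux k (n + 1) ys else (k, n) :: pvGroupAux y 1 ys

def pvGroupRuns : List String → List (String × Int)
  | [] => []
  | x :: xs => pvGroupAux x 1 xs

def graph_family_py_alt (families : List String) : String :=
  let kept := PySem.List.sorted (families.filter (fun f => !pvUnknownish f)) (fun x => x) false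
  if kept = [] then "unknown"
  else PySem.Str.join "+"
    ((pvGroupRuns kept).map (fun p => p.1 ++ ":" ++ PySem.Int.toStr p.2))

-- ===== PRECONDITION & SPEC =====
def Spec_graph_family_py (families : List String) (out : String) : Prop := out = graph_family_py_alt families
instance (families : List String) (out : String) : Decidable (Spec_graph_family_py families out) := by unfold Spec_graph_family_py; infer_instance

-- ===== CLAIM (what is proved, stated in full; the proofs are below) =====
def Claim_equal_graph_family_py : Prop := ∀ (families : List String), Dom_graph_family_py families → Spec_graph_family_py families (graph_family_py families)

-- ===== LEMMAS AND PROOFS =====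

-- A's counting loop is Counter over the kept (non-unknownish) elements
theorem pv_counts_eq_counter (families : List String) :
    families.foldl (fun d family =>
      if pvUnknownish family then d
      else d.insert family (d.getD family 0 + 1)) PySem.Dict.empty
    = PySem.Dict.counter (families.filter (fun f => !pvUnknownish f)) := by
  have h1 : (fun (d : PySem.Dict String Int) family =>
      if pvUnknownish family then d else d.insert family (d.getD family 0 + 1))
    = (fun d family =>
      if (!pvUnknownish family) = true then d.insert family (d.getD family 0 + 1) else d) := by
    funext d f; cases h : pvUnknownish f <;> simp [h]
  rw [h1]
  rw [PySem.List.foldl_if_eq_foldl_filter]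
  rw [PySem.Dict.foldl_insert_getD_add_one_eq_counter]

theorem pv_count_flatMap_replicate {α : Type} [DecidableEq α] (S : List α) (hnd : S.Nodup)
    (c : α → Nat) (a : α) :
    (S.flatMap (fun k => List.replicate (c k) k)).count a = if a ∈ S then c a else 0 := by
  induction S with
  | nil => simp
  | cons x t ih =>
    simp only [List.nodup_cons] at hnd
    simp only [List.flatMap_cons, List.count_append, ih hnd.2, List.mem_cons]
    by_cases hx : a = x
    · subst hx
      simp [hnd.1]
    · simp [List.count_replicate, Ne.symm hx, hx]

theorem pv_pairwise_flatMap_replicate (S : List String) (h : S.Pairwise (· < ·)) (c : String → Nat) :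
    (S.flatMap (fun k => List.replicate (c k) k)).Pairwise (· ≤ ·) := by
  induction S with
  | nil => simp
  | cons x t ih =>
    simp only [List.pairwise_cons] at h
    simp only [List.flatMap_cons]
    rw [List.pairwise_append]
    refine ⟨?_, ih h.2, ?_⟩
    · exact List.pairwise_replicate.mpr (Or.inr (le_refl x))
    · intro a ha b hb
      rw [List.eq_of_mem_replicate ha]
      obtain ⟨k, hk, hbk⟩ := List.mem_flatMap.mp hb
      rw [List.eq_of_mem_replicate hbk]
      exact le_of_lt (h.1 k hk)

theorem pv_groupAux_replicate (k : String) (m : Int) (j : Nat) (rest : List String) :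
    pvGroupAux k m (List.replicate j k ++ rest) = pvGroupAux k (m + j) rest := by
  induction j generalizing m with
  | zero => simp
  | succ n ih =>
    simp only [List.replicate_succ, List.cons_append, pvGroupAux, BEq.rfl, if_true]
    rw [ih]
    congr 1
    push_cast
    ring

theorem pv_groupRuns_flatMap (S : List String) (h : S.Pairwise (· < ·)) (c : String → Nat)
    (hc : ∀ k ∈ S, 1 ≤ c k) :
    pvGroupRuns (S.flatMap (fun k => List.replicate (c k) k)) = S.map (fun k => (k, (c k : Int))) := by
  induction S with
  | nil => simp [pvGroupRuns]
  | cons x t ih =>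
    simp only [List.pairwise_cons] at h
    obtain ⟨j, hj⟩ : ∃ j, c x = j + 1 := ⟨c x - 1, by have := hc x (by simp); omega⟩
    simp only [List.flatMap_cons, hj, List.replicate_succ, List.cons_append]
    show pvGroupAux x 1 _ = _
    rw [pv_groupAux_replicate]
    have ht := ih h.2 (fun k hk => hc k (List.mem_cons_of_mem _ hk))
    cases t with
    | nil =>
      simp [pvGroupAux, hj]
      ring
    | cons y u =>
      obtain ⟨i, hi⟩ : ∃ i, c y = i + 1 := ⟨c y - 1, by have := hc y (by simp); omega⟩
      simp only [List.flatMap_cons, hi, List.replicate_succ, List.cons_append]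
      have hyx : (y == x) = false := by
        simp only [beq_eq_false_iff_ne]
        exact ne_of_gt (h.1 y (by simp))
      simp only [pvGroupAux, hyx, Bool.false_eq_true, if_false]
      simp only [List.flatMap_cons, hi, List.replicate_succ, List.cons_append] at ht
      simp only [pvGroupRuns] at ht
      rw [ht]
      simp [hj]
      ring

-- sorted(kept) is the strictly-sorted distinct keys, each repeated its multiplicity
theorem pv_sorted_eq_flatMap (L : List String) :
    PySem.List.sorted L (fun x => x) false
      = (PySem.List.sorted (PySem.Set.ofList L) (fun x => x) false).flatMap
          (fun k => List.replicate (L.count k) k) := by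
  set S := PySem.List.sorted (PySem.Set.ofList L) (fun x => x) false with hS
  have hperm : S.Perm (PySem.Set.ofList L) := PySem.List.sorted_perm _ _ _
  have hnd : S.Nodup := hperm.nodup_iff.mpr (PySem.Set.nodup_ofList L)
  have hlt : S.Pairwise (· < ·) := PySem.List.sorted_ofList_pairwise_lt L
  have h1 : (S.flatMap (fun k => List.replicate (L.count k) k)).Perm L := by
    rw [List.perm_iff_count]
    intro a
    rw [pv_count_flatMap_replicate S hnd (fun k => L.count k) a]
    by_cases ha : a ∈ L
    · simp [hperm.mem_iff, PySem.Set.mem_ofList, ha]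
    · simp [hperm.mem_iff, PySem.Set.mem_ofList, ha, List.count_eq_zero.mpr ha]
  have h2 : (S.flatMap (fun k => List.replicate (L.count k) k)).Pairwise (· ≤ ·) :=
    pv_pairwise_flatMap_replicate S hlt _
  exact PySem.List.sorted_id_eq_of_perm_of_pairwise _ _ h1 h2

theorem pv_main_eq (families : List String) : graph_family_py families = graph_family_py_alt families := by
  simp only [graph_family_py, graph_family_py_alt]
  rw [pv_counts_eq_counter]
  set L := families.filter (fun f => !pvUnknownish f) with hL
  cases hcase : L with
  | nil => simp [PySem.Dict.counter, PySem.List.sorted]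
  | cons x xs =>
    have hkeys : (PySem.Dict.counter (x :: xs)).keys = PySem.Set.ofList (x :: xs) :=
      PySem.Dict.keys_counter _
    have hsz : ¬ (PySem.Dict.counter (x :: xs)).size = 0 := by
      have hx : x ∈ (PySem.Dict.counter (x :: xs)).keys := by
        rw [hkeys]; exact (PySem.Set.mem_ofList _ _).mpr (by simp)
      intro h
      simp only [PySem.Dict.size] at h
      simp only [PySem.Dict.keys, List.length_eq_zero_iff.mp h] at hx
      simp at hx
    have hkept : ¬ PySem.List.sorted (x :: xs) (fun x => x) false = [] := by
      rw [PySem.List.sorted_eq_nil_iff]; simp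
    rw [if_neg hsz, if_neg hkept]
    rw [pv_sorted_eq_flatMap (x :: xs)]
    rw [pv_groupRuns_flatMap _ (PySem.List.sorted_ofList_pairwise_lt (x :: xs))
        (fun k => (x :: xs).count k)
        (fun k hk => List.count_pos_iff.mpr ((PySem.Set.mem_ofList _ _).mp
          ((PySem.List.mem_sorted _ _ _ _).mp hk)))]
    rw [hkeys, List.map_map]
    congr 1
    apply List.map_congr_left
    intro k hk
    simp [PySem.Dict.getD_counter]

-- ===== VERDICT (by name: the statement is the Claim_ definition above) =====
theorem graph_family_py_spec : Claim_equal_graph_family_py := by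
  intro families _
  exact pv_main_eq families
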